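-- pv_equiv track=rewrite | github.com/aarsh-sharma/Competitive-Programming | GJam/2.py | strength
-- ===== SOURCE A (Python) =====
-- def strength(y):
--     ans = 0
--     power = 1
--     for x in range(len(y)):
--         if(y[x] == "C"):
--             power *= 2
--         else:
--             ans += power
--     return ans
-- ===== SOURCE B (Python) =====
-- def strength(y):
--     ans = 0
--     for ch in reversed(y):
--         if ch == "C":
--             ans *= 2
--         else:
--             ans += 1
--     return ans
-- ===== Notes on version B (the rewrite author's own statement) =====
-- stated objective: simpler
-- what changed: Single right-to-left accumulator that doubles on 'C' and adds 1 otherwise, eliminating the separate power variable and index-based loop.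
import Mathlib
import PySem

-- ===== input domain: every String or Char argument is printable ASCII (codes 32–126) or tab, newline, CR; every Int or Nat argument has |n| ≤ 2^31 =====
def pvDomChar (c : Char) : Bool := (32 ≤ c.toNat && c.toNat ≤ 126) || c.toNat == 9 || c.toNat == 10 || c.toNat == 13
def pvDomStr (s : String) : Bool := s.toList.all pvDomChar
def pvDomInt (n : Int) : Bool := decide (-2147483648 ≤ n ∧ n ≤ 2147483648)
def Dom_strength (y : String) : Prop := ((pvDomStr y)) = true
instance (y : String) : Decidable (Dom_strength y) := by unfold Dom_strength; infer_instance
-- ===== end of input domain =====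

-- B replaces A's (ans, power) forward scan by a single accumulator over the reversed string
-- (double on 'C', add 1 otherwise): simpler, one state variable instead of two.

-- ===== PORT A =====
-- A: forward loop over indices, state (ans, power); 'C' doubles power, otherwise ans += power.
def strength (y : String) : Int :=
  (y.toList.foldl
    (fun (s : Int × Int) c => if c = 'C' then (s.1, s.2 * 2) else (s.1 + s.2, s.2))
    (0, 1)).1

-- ===== PORT B =====
-- B: loop over reversed(y) with one accumulator.
def strength_alt (y : String) : Int :=
  y.toList.reverse.foldl (fun (ans : Int) c => if c = 'C' then ans * 2 else ans + 1) 0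

-- ===== PRECONDITION & SPEC =====
def Spec_strength (y : String) (out : Int) : Prop := out = strength_alt y
instance (y : String) (out : Int) : Decidable (Spec_strength y out) := by unfold Spec_strength; infer_instance

-- ===== CLAIM (what is proved, stated in full; the proofs are below) =====
def Claim_equal_strength : Prop := ∀ (y : String), Dom_strength y → Spec_strength y (strength y)

-- ===== LEMMAS AND PROOFS =====

-- B on c :: l: reversing pushes c to the end, so the last step applies c to B's value on l.
theorem altFold_cons (c : Char) (l : List Char) :
    (c :: l).reverse.foldl (fun (ans : Int) c => if c = 'C' then ans * 2 else ans + 1) 0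
      = (if c = 'C'
          then (l.reverse.foldl (fun (ans : Int) c => if c = 'C' then ans * 2 else ans + 1) 0) * 2
          else (l.reverse.foldl (fun (ans : Int) c => if c = 'C' then ans * 2 else ans + 1) 0) + 1) := by
  simp [List.foldl_append]

-- A's loop invariant: from state (a, p) it ends at a + p * (B's value on the rest).
theorem fold_invariant (l : List Char) (a p : Int) :
    (l.foldl (fun (s : Int × Int) c => if c = 'C' then (s.1, s.2 * 2) else (s.1 + s.2, s.2)) (a, p)).1
      = a + p * l.reverse.foldl (fun (ans : Int) c => if c = 'C' then ans * 2 else ans + 1) 0 := by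
  induction l generalizing a p with
  | nil => simp
  | cons c l ih =>
    rw [List.foldl_cons, altFold_cons]
    by_cases h : c = 'C' <;> simp [h, ih] <;> ring

-- ===== VERDICT (by name: the statement is the Claim_ definition above) =====
theorem strength_spec : Claim_equal_strength := by
  intro y _
  show strength y = strength_alt y
  simpa [strength, strength_alt] using fold_invariant y.toList 0 1
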